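-- pv_equiv track=rewrite | github.com/harry34704/pm-ai-product-lab | pm90/backend/app/services/progress.py | get_next_unlocked_day
-- ===== SOURCE A (Python) =====
-- from typing import Set
--
-- def get_next_unlocked_day(completed_day_numbers: Set[int], total_days: int) -> int:
--     next_day = 1
--     for day_number in range(1, total_days + 1):
--         if day_number in completed_day_numbers:
--             next_day = day_number + 1
--         else:
--             break
--     return min(next_day, total_days)
-- ===== SOURCE B (Python) =====
-- def get_next_unlocked_day(completed_day_numbers, total_days):
--     expected = 1
--     for v in sorted(completed_day_numbers):
--         if v < expected:
--             continue
--         if v == expected: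
--             expected += 1
--         else:
--             break
--     return min(expected, total_days)
-- ===== Notes on version B (the rewrite author's own statement) =====
-- stated objective: alternative
-- what changed: B sorts the completed set once and gap-scans the sorted list with an 'expected' counter instead of A's per-day membership probing over range(1, total_days+1).
import Mathlib
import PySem

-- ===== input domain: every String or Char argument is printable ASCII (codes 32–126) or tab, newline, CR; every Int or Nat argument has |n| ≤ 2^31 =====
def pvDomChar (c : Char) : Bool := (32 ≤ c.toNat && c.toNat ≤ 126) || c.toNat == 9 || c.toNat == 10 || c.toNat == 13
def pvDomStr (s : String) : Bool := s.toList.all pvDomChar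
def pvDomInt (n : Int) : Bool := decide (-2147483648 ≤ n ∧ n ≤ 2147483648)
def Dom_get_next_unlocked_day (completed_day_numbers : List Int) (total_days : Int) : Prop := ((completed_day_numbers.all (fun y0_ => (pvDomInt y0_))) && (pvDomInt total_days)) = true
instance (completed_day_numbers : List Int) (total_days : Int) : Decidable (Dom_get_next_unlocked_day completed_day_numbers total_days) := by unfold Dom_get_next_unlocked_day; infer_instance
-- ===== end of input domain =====

-- B re-implements A's range-probing scan as a sort-then-gap-scan over the completed set; equivalence proved for all inputs (objective: alternative).

-- ===== PORT A =====
-- A's 'for day_number in range(1, total_days+1): …' with an early break, as recursion on the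
-- current day counter d (the next range element); the break keeps evaluation fast on huge total_days.
def pvALoop (s : List Int) (b : Int) (d : Int) (next_day : Int) : Int :=
  if _h : d < b then
    (if s.contains d then pvALoop s b (d + 1) (d + 1) else next_day)
  else next_day
termination_by (b - d).toNat
decreasing_by omega

def get_next_unlocked_day (completed_day_numbers : List Int) (total_days : Int) : Int :=
  min (pvALoop completed_day_numbers (total_days + 1) 1 1) total_days

-- ===== PORT B =====
-- B's 'for v in sorted(…): skip/advance/break' loop, as structural recursion over the sorted list.
def pvBLoop : List Int → Int → Int
  | [], expected => expected
  | v :: rest, expected =>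
    if v < expected then pvBLoop rest expected
    else if v == expected then pvBLoop rest (expected + 1)
    else expected

def get_next_unlocked_day_alt (completed_day_numbers : List Int) (total_days : Int) : Int :=
  min (pvBLoop (PySem.List.sorted completed_day_numbers (fun x => x) false) 1) total_days

-- ===== PRECONDITION & SPEC =====
def Spec_get_next_unlocked_day (completed_day_numbers : List Int) (total_days : Int) (out : Int) : Prop := out = get_next_unlocked_day_alt completed_day_numbers total_days
instance (completed_day_numbers : List Int) (total_days : Int) (out : Int) : Decidable (Spec_get_next_unlocked_day completed_day_numbers total_days out) := by unfold Spec_get_next_unlocked_day; infer_instance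

-- ===== CLAIM (what is proved, stated in full; the proofs are below) =====
def Claim_equal_get_next_unlocked_day : Prop := ∀ (completed_day_numbers : List Int) (total_days : Int), Dom_get_next_unlocked_day completed_day_numbers total_days → Spec_get_next_unlocked_day completed_day_numbers total_days (get_next_unlocked_day completed_day_numbers total_days)

-- ===== LEMMAS AND PROOFS =====

-- A's loop starting at day d (with next_day = d): result r satisfies d ≤ r ≤ b, everything in
-- [d, r) is completed, and if r < b then r is not completed.
theorem pvALoop_spec (s : List Int) (b : Int) :
    ∀ d, d ≤ b →
      d ≤ pvALoop s b d d ∧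
      pvALoop s b d d ≤ b ∧
      (∀ k, d ≤ k → k < pvALoop s b d d → s.contains k) ∧
      (pvALoop s b d d < b → ¬ s.contains (pvALoop s b d d)) := by
  intro d hdb
  induction h : (b - d).toNat generalizing d with
  | zero =>
    rw [show pvALoop s b d d = d from by rw [pvALoop]; simp [show ¬ d < b by omega]]
    refine ⟨le_refl d, hdb, ?_, ?_⟩
    · intro k h1 h2; omega
    · intro hlt; omega
  | succ n ih =>
    have hdb' : d < b := by omega
    by_cases hc : s.contains d
    · obtain ⟨ih1, ih2, ih3, ih4⟩ := ih (d + 1) (by omega) (by omega)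
      rw [show pvALoop s b d d = pvALoop s b (d + 1) (d + 1) from by
        rw [pvALoop]; simp only [dif_pos hdb', hc, if_true]]
      refine ⟨by omega, ih2, ?_, ih4⟩
      intro k hk1 hk2
      by_cases hkd : k = d
      · subst hkd; exact hc
      · exact ih3 k (by omega) hk2
    · have hc' : s.contains d = false := by simpa using hc
      rw [show pvALoop s b d d = d from by
        rw [pvALoop]; simp only [dif_pos hdb', hc', Bool.false_eq_true, if_false]]
      exact ⟨le_refl d, by omega, by intro k h1 h2; omega, fun _ => hc⟩

-- B's loop on a sorted list l starting at e: result r satisfies e ≤ r, everything in [e, r) is in l,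
-- and r ∉ l.
theorem pvBLoop_spec (l : List Int) (hl : l.Pairwise (· ≤ ·)) :
    ∀ e, e ≤ pvBLoop l e ∧ (∀ k, e ≤ k → k < pvBLoop l e → k ∈ l) ∧ pvBLoop l e ∉ l := by
  induction l with
  | nil =>
    intro e
    simp only [pvBLoop, List.not_mem_nil, not_false_iff]
    exact ⟨le_refl e, by intro k h1 h2; exact absurd h2 (by omega), by simp⟩
  | cons v rest ih =>
    intro e
    have hrest : rest.Pairwise (· ≤ ·) := (List.pairwise_cons.mp hl).2
    have hv : ∀ y ∈ rest, v ≤ y := (List.pairwise_cons.mp hl).1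
    by_cases h1 : v < e
    · obtain ⟨r1, r2, r3⟩ := ih hrest e
      rw [show pvBLoop (v :: rest) e = pvBLoop rest e from by simp only [pvBLoop, if_pos h1]]
      refine ⟨r1, ?_, ?_⟩
      · intro k hk1 hk2; exact List.mem_cons_of_mem _ (r2 k hk1 hk2)
      · simp only [List.mem_cons, not_or]
        exact ⟨by omega, r3⟩
    · by_cases h2 : v = e
      · obtain ⟨r1, r2, r3⟩ := ih hrest (e + 1)
        rw [show pvBLoop (v :: rest) e = pvBLoop rest (e + 1) from by
          simp only [pvBLoop, if_neg h1, if_pos (show (v == e) = true by simp [h2])]]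
        refine ⟨by omega, ?_, ?_⟩
        · intro k hk1 hk2
          by_cases hke : k = e
          · subst hke; simp [h2]
          · exact List.mem_cons_of_mem _ (r2 k (by omega) hk2)
        · simp only [List.mem_cons, not_or]
          exact ⟨by omega, r3⟩
      · rw [show pvBLoop (v :: rest) e = e from by
          simp only [pvBLoop, if_neg h1, if_neg (show ¬ (v == e) = true by simp [h2])]]
        refine ⟨le_refl e, by intro k hk1 hk2; omega, ?_⟩
        simp only [List.mem_cons, not_or]
        refine ⟨by omega, ?_⟩
        intro hmem
        have := hv e hmem
        omega

-- ===== VERDICT (by name: the statement is the Claim_ definition above) =====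
theorem get_next_unlocked_day_spec : Claim_equal_get_next_unlocked_day := by
  intro s td _
  unfold Spec_get_next_unlocked_day get_next_unlocked_day get_next_unlocked_day_alt
  have hpw : (PySem.List.sorted s (fun x => x) false).Pairwise (· ≤ ·) :=
    PySem.List.sorted_pairwise s (fun x => x)
  obtain ⟨b1, b2, b3⟩ := pvBLoop_spec (PySem.List.sorted s (fun x => x) false) hpw 1
  set rb := pvBLoop (PySem.List.sorted s (fun x => x) false) 1 with hrb
  by_cases htd : td < 0
  · -- empty range: A's loop returns 1; both mins cap to td
    rw [show pvALoop s (td + 1) 1 1 = 1 from by rw [pvALoop]; simp [show ¬ (1:Int) < td + 1 by omega]]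
    omega
  obtain ⟨a1, a2, a3, a4⟩ := pvALoop_spec s (td + 1) 1 (by omega)
  set ra := pvALoop s (td + 1) 1 1 with hra
  have hmem : ∀ x, x ∈ PySem.List.sorted s (fun x => x) false ↔ x ∈ s :=
    fun x => PySem.List.mem_sorted s (fun x => x) false x
  -- rb is not completed; everything in [1, ra) is completed; so ra ≤ rb
  have hrbs : ¬ s.contains rb := fun hc => b3 ((hmem rb).mpr (by simpa using hc))
  have hle : ra ≤ rb := by
    by_contra hgt
    exact hrbs (a3 rb b1 (by omega))
  by_cases hcase : ra < td + 1
  · -- ra is not completed; everything in [1, rb) is completed; so rb ≤ ra, hence ra = rb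
    have hras : ¬ s.contains ra := a4 hcase
    have hge : rb ≤ ra := by
      by_contra hgt
      have : ra ∈ PySem.List.sorted s (fun x => x) false := b2 ra a1 (by omega)
      exact hras (by simpa using (hmem ra).mp this)
    omega
  · -- ra = td + 1 and rb ≥ ra: both mins are td
    omega
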